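-- pv_equiv track=rewrite | github.com/pFransozi/cryptography | shift_chipher.py | create_shift_substitutions_alphabet_uppercase
-- ===== SOURCE A (Python) =====
-- import string
--
-- def shift_module_operation(dividend, divisor):
--     return (dividend % divisor)
--
-- def create_shift_substitutions_alphabet_uppercase(shifting_number):
--
--     encoding = {}
--     decoding = {}
--
--     alphabet_size = len(string.ascii_uppercase)
--
--     for index in range(alphabet_size):
--
--         letter = string.ascii_uppercase[index]
--         shifted_index = shift_module_operation(index+shifting_number, alphabet_size)
--         subst_letter = string.ascii_uppercase[shifted_index]
--
--         encoding[letter] = subst_letter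
--         decoding[subst_letter] = letter
--
--     return encoding, decoding
-- ===== SOURCE B (Python) =====
-- import string
--
-- def create_shift_substitutions_alphabet_uppercase(shifting_number):
--     s = shifting_number % 26
--     alpha = string.ascii_uppercase
--     rotated = alpha[s:] + alpha[:s]
--     encoding = dict(zip(alpha, rotated))
--     decoding = dict(zip(rotated, alpha))
--     return encoding, decoding
-- ===== Notes on version B (the rewrite author's own statement) =====
-- stated objective: idiomatic
-- what changed: Replaces the explicit 26-iteration index loop with per-letter modulo arithmetic by one slice-based rotation of the alphabet and two dict(zip(...)) constructions.
import Mathlib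
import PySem

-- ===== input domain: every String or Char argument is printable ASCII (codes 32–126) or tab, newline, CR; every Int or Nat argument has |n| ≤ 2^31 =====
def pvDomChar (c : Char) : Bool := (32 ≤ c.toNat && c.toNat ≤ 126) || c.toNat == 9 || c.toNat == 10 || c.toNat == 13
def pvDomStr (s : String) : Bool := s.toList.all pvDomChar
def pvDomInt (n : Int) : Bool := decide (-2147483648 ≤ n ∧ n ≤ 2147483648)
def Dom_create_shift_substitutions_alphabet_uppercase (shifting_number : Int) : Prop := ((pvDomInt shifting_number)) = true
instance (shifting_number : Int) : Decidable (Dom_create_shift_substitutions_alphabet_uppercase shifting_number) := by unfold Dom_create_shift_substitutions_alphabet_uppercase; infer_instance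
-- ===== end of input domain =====

-- B builds the encoding/decoding maps from one slice-rotated alphabet and two zips instead of A's
-- explicit index loop with a per-letter modulo (objective: idiomatic; return value proved equal).

-- ===== PORT A =====
-- string.ascii_uppercase
def pvAlphaU : String := "ABCDEFGHIJKLMNOPQRSTUVWXYZ"

-- s[i] as a one-character string (A only indexes in range, so the IndexError default "" is never used)
def pvCharAt (i : Int) : String :=
  ((PySem.Str.pyGet? pvAlphaU i).map (fun c => String.ofList [c])).getD ""

def shift_module_operation (dividend divisor : Int) : Int :=
  PySem.Int.mod dividend divisor

-- the body of A's for-loop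
def pvStepA (shifting_number : Int)
    (st : PySem.Dict String String × PySem.Dict String String) (index : Int) :
    PySem.Dict String String × PySem.Dict String String :=
  let letter := pvCharAt index
  let shifted_index := shift_module_operation (index + shifting_number) (PySem.Str.len pvAlphaU)
  let subst_letter := pvCharAt shifted_index
  (st.1.insert letter subst_letter, st.2.insert subst_letter letter)

def create_shift_substitutions_alphabet_uppercase (shifting_number : Int) :
    (List (String × String)) × (List (String × String)) :=
  let alphabet_size : Int := PySem.Str.len pvAlphaU
  let st := (PySem.List.pyRange 0 alphabet_size 1).foldl (pvStepA shifting_number)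
      (PySem.Dict.empty, PySem.Dict.empty)
  (st.1.items, st.2.items)

-- ===== PORT B =====
def create_shift_substitutions_alphabet_uppercase_alt (shifting_number : Int) :
    (List (String × String)) × (List (String × String)) :=
  let s := PySem.Int.mod shifting_number 26
  let alpha := pvAlphaU.toList
  let rotated := PySem.List.slice alpha (some s) none ++ PySem.List.slice alpha none (some s)
  let pairs := alpha.zip rotated
  let encoding : PySem.Dict String String :=
    PySem.Dict.ofList (pairs.map (fun p => (String.ofList [p.1], String.ofList [p.2])))
  let decoding : PySem.Dict String String :=
    PySem.Dict.ofList (pairs.map (fun p => (String.ofList [p.2], String.ofList [p.1])))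
  (encoding.items, decoding.items)

-- ===== PRECONDITION & SPEC =====
def Spec_create_shift_substitutions_alphabet_uppercase (shifting_number : Int) (out : (List (String × String)) × (List (String × String))) : Prop := out = create_shift_substitutions_alphabet_uppercase_alt shifting_number
instance (shifting_number : Int) (out : (List (String × String)) × (List (String × String))) : Decidable (Spec_create_shift_substitutions_alphabet_uppercase shifting_number out) := by unfold Spec_create_shift_substitutions_alphabet_uppercase; infer_instance

-- ===== CLAIM (what is proved, stated in full; the proofs are below) =====
def Claim_equal_create_shift_substitutions_alphabet_uppercase : Prop := ∀ (shifting_number : Int), Dom_create_shift_substitutions_alphabet_uppercase shifting_number → Spec_create_shift_substitutions_alphabet_uppercase shifting_number (create_shift_substitutions_alphabet_uppercase shifting_number)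

-- ===== LEMMAS AND PROOFS =====

-- the alphabet as a character list (proof-side name for pvAlphaU.toList)
def pvAl : List Char := pvAlphaU.toList

-- the rotated index
def pvIdx (r k : Nat) : Nat := (k + r) % 26

theorem pvAl_length : pvAl.length = 26 := by decide

theorem pvAl_nodup : pvAl.Nodup := by decide

theorem pvLen26 : PySem.Str.len pvAlphaU = (26 : Int) := by decide

theorem pvCharAt_get (j : Nat) (h : j < pvAl.length) :
    pvCharAt (j : Int) = String.ofList [pvAl[j]] := by
  simp only [pvCharAt, PySem.Str.pyGet?_natCast]
  rw [show pvAlphaU.toList = pvAl from rfl, List.getElem?_eq_getElem h]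
  rfl

-- a fold of a product whose components evolve independently splits
theorem pvFoldPair {α β γ : Type} (l : List γ) (f : α → γ → α) (g : β → γ → β) (a : α) (b : β) :
    l.foldl (fun st x => (f st.1 x, g st.2 x)) (a, b) = (l.foldl f a, l.foldl g b) := by
  induction l generalizing a b with
  | nil => rfl
  | cons x xs ih => simpa using ih (f a x) (g b x)

-- an insert loop over 26 distinct fresh keys just lists its pairs
theorem pvItems_range (key val : Nat → String)
    (hnd : ((List.range 26).map key).Nodup) :
    ((List.range 26).foldl (fun d k => d.insert (key k) (val k)) PySem.Dict.empty).items
      = (List.range 26).map (fun k => (key k, val k)) := by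
  rw [PySem.Dict.items_foldl_insert_fresh (List.range 26) key val PySem.Dict.empty
      (fun a _ => by simp) hnd]
  rfl

-- distinct alphabet positions give distinct one-letter strings
theorem pvNd (f : Nat → Nat) (hlt : ∀ a, a < 26 → f a < 26)
    (hinj : ∀ a, a < 26 → ∀ b, b < 26 → f a = f b → a = b) :
    ((List.range 26).map (fun (k : Nat) => pvCharAt ((f k : Nat) : Int))).Nodup := by
  refine List.Nodup.map_on ?_ List.nodup_range
  intro a ha b hb h
  rw [List.mem_range] at ha hb
  have hfa : f a < pvAl.length := by rw [pvAl_length]; exact hlt a ha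
  have hfb : f b < pvAl.length := by rw [pvAl_length]; exact hlt b hb
  rw [pvCharAt_get _ hfa, pvCharAt_get _ hfb] at h
  have h2 : pvAl[f a]'hfa = pvAl[f b]'hfb := by
    simpa [String.ofList_inj] using h
  exact hinj a ha b hb ((List.Nodup.getElem_inj_iff pvAl_nodup).mp h2)

theorem pvNd_id : ((List.range 26).map (fun (k : Nat) => pvCharAt (k : Int))).Nodup := by
  have := pvNd (fun k => k) (fun a ha => ha) (fun a _ b _ h => h)
  simpa using this

theorem pvNd_shift (r : Nat) (_hr : r < 26) :
    ((List.range 26).map (fun (k : Nat) => pvCharAt ((pvIdx r k : Nat) : Int))).Nodup := by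
  refine pvNd (pvIdx r) (fun a _ => Nat.mod_lt _ (by omega)) ?_
  intro a ha b hb h
  have h' : (a + r) % 26 = (b + r) % 26 := h
  omega

-- A's result, characterised
theorem pvA_eq (n : Int) (r : Nat) (hr : PySem.Int.mod n 26 = (r : Int)) (hr26 : r < 26) :
    create_shift_substitutions_alphabet_uppercase n
      = ((List.range 26).map (fun (k : Nat) => (pvCharAt (k : Int), pvCharAt ((pvIdx r k : Nat) : Int))),
         (List.range 26).map (fun (k : Nat) => (pvCharAt ((pvIdx r k : Nat) : Int), pvCharAt (k : Int)))) := by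
  have hmod : ∀ k : Nat, PySem.Int.mod ((k : Int) + n) 26 = ((pvIdx r k : Nat) : Int) := by
    intro k
    show PySem.Int.mod ((k : Int) + n) 26 = (((k + r) % 26 : Nat) : Int)
    rw [PySem.Int.mod_eq_emod_of_pos (by omega)]
    rw [PySem.Int.mod_eq_emod_of_pos (by omega)] at hr
    omega
  have hstep : (fun (st : PySem.Dict String String × PySem.Dict String String) (k : Nat) =>
        pvStepA n st ((fun k : Nat => (k : Int)) k))
      = (fun st k =>
          ((fun (d : PySem.Dict String String) (k : Nat) =>
              d.insert (pvCharAt (k : Int)) (pvCharAt ((pvIdx r k : Nat) : Int))) st.1 k,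
           (fun (d : PySem.Dict String String) (k : Nat) =>
              d.insert (pvCharAt ((pvIdx r k : Nat) : Int)) (pvCharAt (k : Int))) st.2 k)) := by
    funext st k
    simp only [pvStepA, shift_module_operation, pvLen26, hmod k]
  simp only [create_shift_substitutions_alphabet_uppercase, pvLen26]
  rw [show (26 : Int) = ((26 : Nat) : Int) by norm_num, PySem.List.pyRange_zero_natCast,
      List.foldl_map, hstep,
      pvFoldPair (List.range 26)
        (fun (d : PySem.Dict String String) (k : Nat) =>
          d.insert (pvCharAt (k : Int)) (pvCharAt ((pvIdx r k : Nat) : Int)))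
        (fun (d : PySem.Dict String String) (k : Nat) =>
          d.insert (pvCharAt ((pvIdx r k : Nat) : Int)) (pvCharAt (k : Int)))
        PySem.Dict.empty PySem.Dict.empty,
      pvItems_range _ _ pvNd_id, pvItems_range _ _ (pvNd_shift r hr26)]

-- B's zipped pair list, characterised (encoding direction)
theorem pvPairs (r : Nat) (hr : r < 26) :
    (pvAl.zip (pvAl.drop r ++ pvAl.take r)).map
        (fun p => (String.ofList [p.1], String.ofList [p.2]))
      = (List.range 26).map (fun (k : Nat) => (pvCharAt (k : Int), pvCharAt ((pvIdx r k : Nat) : Int))) := by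
  rw [← List.rotate_eq_drop_append_take (by rw [pvAl_length]; omega)]
  apply List.ext_getElem
  · simp [pvAl_length]
  intro i h1 h2
  have hi : i < 26 := by simpa using h2
  have hi' : i < pvAl.length := by rw [pvAl_length]; omega
  have hm : (i + r) % 26 < pvAl.length := by rw [pvAl_length]; exact Nat.mod_lt _ (by omega)
  simp only [List.getElem_map, List.getElem_zip, List.getElem_rotate, List.getElem_range,
    pvAl_length]
  simp only [pvIdx]
  rw [pvCharAt_get i hi', pvCharAt_get _ hm]

-- B's zipped pair list, characterised (decoding direction)
theorem pvPairsSwap (r : Nat) (hr : r < 26) :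
    (pvAl.zip (pvAl.drop r ++ pvAl.take r)).map
        (fun p => (String.ofList [p.2], String.ofList [p.1]))
      = (List.range 26).map (fun (k : Nat) => (pvCharAt ((pvIdx r k : Nat) : Int), pvCharAt (k : Int))) := by
  rw [← List.rotate_eq_drop_append_take (by rw [pvAl_length]; omega)]
  apply List.ext_getElem
  · simp [pvAl_length]
  intro i h1 h2
  have hi : i < 26 := by simpa using h2
  have hi' : i < pvAl.length := by rw [pvAl_length]; omega
  have hm : (i + r) % 26 < pvAl.length := by rw [pvAl_length]; exact Nat.mod_lt _ (by omega)
  simp only [List.getElem_map, List.getElem_zip, List.getElem_rotate, List.getElem_range,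
    pvAl_length]
  simp only [pvIdx]
  rw [pvCharAt_get i hi', pvCharAt_get _ hm]

-- B's result, characterised
theorem pvB_eq (n : Int) (r : Nat) (hr : PySem.Int.mod n 26 = (r : Int)) (hr26 : r < 26) :
    create_shift_substitutions_alphabet_uppercase_alt n
      = ((List.range 26).map (fun (k : Nat) => (pvCharAt (k : Int), pvCharAt ((pvIdx r k : Nat) : Int))),
         (List.range 26).map (fun (k : Nat) => (pvCharAt ((pvIdx r k : Nat) : Int), pvCharAt (k : Int)))) := by
  simp only [create_shift_substitutions_alphabet_uppercase_alt]
  rw [show pvAlphaU.toList = pvAl from rfl, hr,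
      PySem.List.slice_from _ (by positivity), PySem.List.slice_to _ (by positivity),
      Int.toNat_natCast, pvPairs r hr26, pvPairsSwap r hr26]
  rw [show (PySem.Dict.ofList : List (String × String) → PySem.Dict String String)
        = fun l => l.foldl (fun d p => d.insert p.1 p.2) PySem.Dict.empty from rfl]
  simp only [List.foldl_map]
  rw [pvItems_range _ _ pvNd_id, pvItems_range _ _ (pvNd_shift r hr26)]

-- ===== VERDICT (by name: the statement is the Claim_ definition above) =====
theorem create_shift_substitutions_alphabet_uppercase_spec : Claim_equal_create_shift_substitutions_alphabet_uppercase := by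
  intro n _
  show create_shift_substitutions_alphabet_uppercase n
      = create_shift_substitutions_alphabet_uppercase_alt n
  have h0 : 0 ≤ PySem.Int.mod n 26 := PySem.Int.mod_nonneg n (by omega)
  have h1 : PySem.Int.mod n 26 < 26 := PySem.Int.mod_lt n (by omega)
  have hr : PySem.Int.mod n 26 = (((PySem.Int.mod n 26).toNat : Nat) : Int) :=
    (Int.toNat_of_nonneg h0).symm
  have hr26 : (PySem.Int.mod n 26).toNat < 26 := by omega
  rw [pvA_eq n _ hr hr26, pvB_eq n _ hr hr26]
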